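-- pv_equiv track=rewrite | github.com/dirmich/LOOM | decode_all_rooms_correct.py | drawStripEGA
-- ===== SOURCE A (Python) =====
-- def drawStripEGA(src, height):
--     """ScummVM drawStripEGA"""
--     pixels = [[0 for _ in range(8)] for _ in range(height)]
--     color, run, x, y, src_idx = 0, 0, 0, 0, 0
--
--     while x < 8 and src_idx < len(src):
--         color = src[src_idx]
--         src_idx += 1
--
--         if color & 0x80:
--             run = color & 0x3F
--             if color & 0x40:  # Two-color dithering
--                 if src_idx >= len(src): break
--                 color = src[src_idx]
--                 src_idx += 1
--                 if run == 0:
--                     if src_idx >= len(src): break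
--                     run = src[src_idx]
--                     src_idx += 1
--                 for z in range(run):
--                     if x >= 8: break
--                     if y < height:
--                         pixel_color = (color & 0xF) if (z & 1) else (color >> 4)
--                         pixels[y][x] = pixel_color
--                     y += 1
--                     if y >= height: y, x = 0, x + 1
--             else:  # Repeat previous
--                 if run == 0:
--                     if src_idx >= len(src): break
--                     run = src[src_idx]
--                     src_idx += 1
--                 for z in range(run):
--                     if x >= 8: break
--                     if y < height:
--                         pixels[y][x] = pixels[y][x - 1] if x > 0 else 0
--                     y += 1
--                     if y >= height: y, x = 0, x + 1
--         else:  # Single color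
--             run = color >> 4
--             if run == 0:
--                 if src_idx >= len(src): break
--                 run = src[src_idx]
--                 src_idx += 1
--             pixel_color = color & 0xF
--             for z in range(run):
--                 if x >= 8: break
--                 if y < height:
--                     pixels[y][x] = pixel_color
--                 y += 1
--                 if y >= height: y, x = 0, x + 1
--
--     return pixels
-- ===== SOURCE B (Python) =====
-- def _dither_chunk(col, k):
--     return [(col & 0xF) if (z & 1) else (col >> 4) for z in range(k)]
--
--
-- def drawStripEGA(src, height):
--     """ScummVM drawStripEGA: decode into a flat column-major stream, then reshape."""
--     h = height if height > 0 else 0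
--     total = 8 * h
--     flat = []
--     i = 0
--     while i < len(src) and len(flat) < total:
--         op = src[i]
--         i += 1
--         if op & 0x80:
--             run = op & 0x3F
--             if op & 0x40:  # two-color dither
--                 if i >= len(src):
--                     break
--                 col = src[i]
--                 i += 1
--                 if run == 0:
--                     if i >= len(src):
--                         break
--                     run = src[i]
--                     i += 1
--                 flat += _dither_chunk(col, min(run, total - len(flat)))
--             else:  # repeat previous column's pixel (h back in the stream)
--                 if run == 0:
--                     if i >= len(src):
--                         break
--                     run = src[i]
--                     i += 1
--                 z = 0
--                 while z < run and len(flat) < total: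
--                     flat.append(flat[-h] if len(flat) >= h else 0)
--                     z += 1
--         else:  # single color
--             run = op >> 4
--             if run == 0:
--                 if i >= len(src):
--                     break
--                 run = src[i]
--                 i += 1
--             flat += [op & 0xF] * min(run, total - len(flat))
--     flat += [0] * (total - len(flat))
--     return [[flat[x * h + y] for x in range(8)] for y in range(h)]
-- ===== Notes on version B (the rewrite author's own statement) =====
-- stated objective: alternative
-- what changed: A decodes by writing into a preallocated height x 8 grid through an (x, y) column-major cursor with wrap-around logic repeated in every opcode branch; B instead emits pixels into a single flat append-only stream (the repeat opcode just copies the value height positions back), pads it with zeros and reshapes it column-major into the grid once at the end.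
import Mathlib
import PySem

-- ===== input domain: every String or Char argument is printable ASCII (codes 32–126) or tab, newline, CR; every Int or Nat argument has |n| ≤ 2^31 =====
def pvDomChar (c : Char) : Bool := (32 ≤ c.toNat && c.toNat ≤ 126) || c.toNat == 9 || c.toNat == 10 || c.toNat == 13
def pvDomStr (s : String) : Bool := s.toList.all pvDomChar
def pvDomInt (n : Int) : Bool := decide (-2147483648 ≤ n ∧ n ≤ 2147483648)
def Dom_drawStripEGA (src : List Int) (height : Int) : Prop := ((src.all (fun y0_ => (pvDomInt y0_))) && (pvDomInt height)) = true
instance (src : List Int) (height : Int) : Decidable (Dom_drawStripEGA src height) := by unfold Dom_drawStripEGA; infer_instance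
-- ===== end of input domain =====

-- B replaces A's 2D pixel grid with (x, y) write cursor by a flat append-only
-- column-major stream reshaped once at the end (objective: alternative data structure).

-- ===== PORT A =====
-- pixels[y][x] = v (indices always in range where A writes)
def pvSetCell (pixels : List (List Int)) (y x : Nat) (v : Int) : List (List Int) :=
  pixels.set y ((pixels.getD y []).set x v)

-- dither value at intra-run index z: (color & 0xF) if (z & 1) else (color >> 4)
def pvDVal (color : Int) (z : Nat) : Int := if z % 2 = 1 then Int.land color 15 else color >>> (4:Int)

-- A's inner `for z in range(run)` loop, single-color mode; returns (pixels, x, y)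
def pvARunSingle (height : Int) (v : Int) : Nat → Nat → Nat → List (List Int) → List (List Int) × Nat × Nat
  | 0, x, y, pixels => (pixels, x, y)
  | fuel+1, x, y, pixels =>
    if 8 ≤ x then (pixels, x, y)
    else
      let pixels := if (y : Int) < height then pvSetCell pixels y x v else pixels
      let y := y + 1
      if height ≤ (y : Int) then pvARunSingle height v fuel (x+1) 0 pixels
      else pvARunSingle height v fuel x y pixels

-- A's inner loop, two-color dithering mode (z is the intra-run index)
def pvARunDither (height : Int) (color : Int) : Nat → Nat → Nat → Nat → List (List Int) → List (List Int) × Nat × Nat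
  | 0, _, x, y, pixels => (pixels, x, y)
  | fuel+1, z, x, y, pixels =>
    if 8 ≤ x then (pixels, x, y)
    else
      let pixels := if (y : Int) < height then pvSetCell pixels y x (pvDVal color z) else pixels
      let y := y + 1
      if height ≤ (y : Int) then pvARunDither height color fuel (z+1) (x+1) 0 pixels
      else pvARunDither height color fuel (z+1) x y pixels

-- A's inner loop, repeat-previous mode: pixels[y][x-1] if x > 0 else 0
def pvARunRepeat (height : Int) : Nat → Nat → Nat → List (List Int) → List (List Int) × Nat × Nat
  | 0, x, y, pixels => (pixels, x, y)
  | fuel+1, x, y, pixels =>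
    if 8 ≤ x then (pixels, x, y)
    else
      let v := if 0 < x then (pixels.getD y []).getD (x-1) 0 else 0
      let pixels := if (y : Int) < height then pvSetCell pixels y x v else pixels
      let y := y + 1
      if height ≤ (y : Int) then pvARunRepeat height fuel (x+1) 0 pixels
      else pvARunRepeat height fuel x y pixels

-- A's outer `while x < 8 and src_idx < len(src)` loop; src consumed head-wise;
-- x, y are Python ints that provably stay ≥ 0, carried as Nat
def pvALoop (height : Int) : List Int → Nat → Nat → List (List Int) → List (List Int)
  | src, x, y, pixels =>
    if x < 8 then
      match src with
      | [] => pixels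
      | color :: rest =>
        if Int.land color 128 ≠ 0 then
          let run := Int.land color 63
          if Int.land color 64 ≠ 0 then
            match rest with
            | [] => pixels
            | c2 :: rest2 =>
              if run = 0 then
                match rest2 with
                | [] => pixels
                | r :: rest3 =>
                  let s := pvARunDither height c2 r.toNat 0 x y pixels
                  pvALoop height rest3 s.2.1 s.2.2 s.1
              else
                let s := pvARunDither height c2 run.toNat 0 x y pixels
                pvALoop height rest2 s.2.1 s.2.2 s.1
          else
            if run = 0 then
              match rest with
              | [] => pixels
              | r :: rest2 =>
                let s := pvARunRepeat height r.toNat x y pixels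
                pvALoop height rest2 s.2.1 s.2.2 s.1
            else
              let s := pvARunRepeat height run.toNat x y pixels
              pvALoop height rest s.2.1 s.2.2 s.1
        else
          let run := color >>> (4:Int)
          if run = 0 then
            match rest with
            | [] => pixels
            | r :: rest2 =>
              let s := pvARunSingle height (Int.land color 15) r.toNat x y pixels
              pvALoop height rest2 s.2.1 s.2.2 s.1
          else
            let s := pvARunSingle height (Int.land color 15) run.toNat x y pixels
            pvALoop height rest s.2.1 s.2.2 s.1
    else pixels
  termination_by src _ _ _ => src.length
  decreasing_by all_goals (simp_all; try omega)

-- pixels = [[0]*8 for _ in range(height)] is replicate height.toNat (range of a negative is empty)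
def drawStripEGA (src : List Int) (height : Int) : List (List Int) :=
  pvALoop height src 0 0 (List.replicate height.toNat (List.replicate 8 0))

-- ===== PORT B =====
-- [(col & 0xF) if (z & 1) else (col >> 4) for z in range(k)]
def pvDitherChunk (color : Int) (k : Nat) : List Int :=
  (List.range k).map (fun z => if z % 2 = 1 then Int.land color 15 else color >>> (4:Int))

-- B's repeat-previous while loop: append flat[-h] (0 when len(flat) < h)
def pvBRepeat (h total : Nat) : Nat → List Int → List Int
  | 0, flat => flat
  | fuel+1, flat =>
    if flat.length < total then
      pvBRepeat h total fuel (flat ++ [if h ≤ flat.length then flat.getD (flat.length - h) 0 else 0])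
    else flat

-- min(run, total - len(flat)) clamped to a count (a negative run emits nothing)
def pvClamp (run : Int) (rem : Nat) : Nat := (min run (rem : Int)).toNat

-- B's outer loop over src, building the flat stream
def pvBLoop (h total : Nat) : List Int → List Int → List Int
  | src, flat =>
    if flat.length < total then
      match src with
      | [] => flat
      | op :: rest =>
        if Int.land op 128 ≠ 0 then
          let run := Int.land op 63
          if Int.land op 64 ≠ 0 then
            match rest with
            | [] => flat
            | c :: rest2 =>
              if run = 0 then
                match rest2 with
                | [] => flat
                | r :: rest3 =>
                  pvBLoop h total rest3 (flat ++ pvDitherChunk c (pvClamp r (total - flat.length)))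
              else
                pvBLoop h total rest2 (flat ++ pvDitherChunk c (pvClamp run (total - flat.length)))
          else
            if run = 0 then
              match rest with
              | [] => flat
              | r :: rest2 =>
                pvBLoop h total rest2 (pvBRepeat h total r.toNat flat)
            else
              pvBLoop h total rest (pvBRepeat h total run.toNat flat)
        else
          let run := op >>> (4:Int)
          if run = 0 then
            match rest with
            | [] => flat
            | r :: rest2 =>
              pvBLoop h total rest2 (flat ++ List.replicate (pvClamp r (total - flat.length)) (Int.land op 15))
          else
            pvBLoop h total rest (flat ++ List.replicate (pvClamp run (total - flat.length)) (Int.land op 15))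
    else flat
  termination_by src _ => src.length
  decreasing_by all_goals (simp_all; try omega)

-- h = height if height > 0 else 0; reshape flat[x*h+y] at the end
def drawStripEGA_alt (src : List Int) (height : Int) : List (List Int) :=
  let h := height.toNat
  let total := 8 * h
  let flat := pvBLoop h total src []
  let flatP := flat ++ List.replicate (total - flat.length) 0
  (List.range h).map (fun y => (List.range 8).map (fun x => flatP.getD (x * h + y) 0))

-- ===== PRECONDITION & SPEC =====
def Spec_drawStripEGA (src : List Int) (height : Int) (out : List (List Int)) : Prop := out = drawStripEGA_alt src height
instance (src : List Int) (height : Int) (out : List (List Int)) : Decidable (Spec_drawStripEGA src height out) := by unfold Spec_drawStripEGA; infer_instance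

-- ===== CLAIM (what is proved, stated in full; the proofs are below) =====
def Claim_equal_drawStripEGA : Prop := ∀ (src : List Int) (height : Int), Dom_drawStripEGA src height → Spec_drawStripEGA src height (drawStripEGA src height)

-- ===== LEMMAS AND PROOFS =====
-- the grid a flat column-major stream denotes (absent cells are 0)
def pvGrid (h : Nat) (flat : List Int) : List (List Int) :=
  (List.range h).map (fun y => (List.range 8).map (fun x => flat.getD (x * h + y) 0))

-- loop invariant tying A's cursor (x, y) to the stream length
def pvInv (h x y : Nat) (flat : List Int) : Prop :=
  y < h ∧ x ≤ 8 ∧ (x = 8 → y = 0) ∧ flat.length = x * h + y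

theorem pvGrid_nil (h : Nat) : pvGrid h [] = List.replicate h (List.replicate 8 0) := by
  simp [pvGrid, List.map_const']

theorem pvEnc_inj {h x x' y y' : Nat} (hy : y < h) (hy' : y' < h)
    (he : x * h + y = x' * h + y') : x = x' ∧ y = y' := by
  have hxx : x = x' := by
    by_contra hne
    rcases Nat.lt_or_ge x x' with hl | hg
    · have h2 : (x+1)*h ≤ x'*h := Nat.mul_le_mul_right _ hl
      have h3 : (x+1)*h = x*h + h := by ring
      omega
    · have hl : x' < x := by omega
      have h2 : (x'+1)*h ≤ x*h := Nat.mul_le_mul_right _ hl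
      have h3 : (x'+1)*h = x'*h + h := by ring
      omega
  subst hxx; omega

-- getD of append at index ≠ length

theorem pvGetD_append_ne (flat : List Int) (v : Int) (k : Nat) (hk : k ≠ flat.length) :
    (flat ++ [v]).getD k 0 = flat.getD k 0 := by
  rcases Nat.lt_or_ge k flat.length with hl | hg
  · rw [List.getD_append _ _ _ _ hl]
  · have hg' : flat.length < k := by omega
    rw [List.getD_eq_default _ _ (by simp; omega), List.getD_eq_default _ _ (by omega)]

theorem pvGrid_read {h x y : Nat} (flat : List Int) (hy : y < h) (hx : x < 8) :
    ((pvGrid h flat).getD y []).getD x 0 = flat.getD (x * h + y) 0 := by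
  have h1 : (pvGrid h flat).getD y [] = (List.range 8).map (fun x => flat.getD (x * h + y) 0) := by
    rw [pvGrid, List.getD_eq_getElem?_getD]
    simp [hy]
  rw [h1, List.getD_eq_getElem?_getD]
  simp [hx]

theorem pvGrid_write {h x y : Nat} (flat : List Int) (v : Int) (hy : y < h) (hx : x < 8)
    (hl : flat.length = x * h + y) :
    pvSetCell (pvGrid h flat) y x v = pvGrid h (flat ++ [v]) := by
  have hrow : (pvGrid h flat).getD y [] = (List.range 8).map (fun xx => flat.getD (xx * h + y) 0) := by
    rw [pvGrid, List.getD_eq_getElem?_getD]; simp [hy]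
  have hlen : (pvGrid h flat).length = h := by simp [pvGrid]
  apply List.ext_getElem
  · simp [pvSetCell, pvGrid]
  · intro i hi hi2
    have hih : i < h := by simpa [pvGrid] using hi2
    show (List.set (pvGrid h flat) y _)[i] = _
    by_cases hiy : y = i
    · subst hiy
      rw [List.getElem_set, if_pos rfl, hrow]
      apply List.ext_getElem
      · simp [pvGrid]
      · intro j hj hj2
        have hj8 : j < 8 := by simpa using hj
        simp only [pvGrid, List.getElem_map, List.getElem_range]
        rw [List.getElem_set]
        by_cases hjx : x = j
        · subst hjx
          simp only [if_true, eq_self_iff_true]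
          rw [← hl]
          simp [List.getD_append_right]
        · rw [if_neg hjx, List.getElem_map, List.getElem_range]
          rw [pvGetD_append_ne]
          intro hc
          exact hjx (pvEnc_inj (x := x) (x' := j) hy hy (by omega)).1
    · rw [List.getElem_set, if_neg hiy]
      simp only [pvGrid, List.getElem_map, List.getElem_range]
      apply List.ext_getElem
      · simp
      · intro j hj hj2
        simp only [List.getElem_map, List.getElem_range]
        rw [pvGetD_append_ne]
        intro hc
        exact hiy (pvEnc_inj (x := x) (x' := j) hy hih (by omega)).2

theorem pvGrid_pad (h : Nat) (flat : List Int) (k : Nat) :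
    pvGrid h (flat ++ List.replicate k 0) = pvGrid h flat := by
  unfold pvGrid
  apply List.map_congr_left
  intro y hy
  apply List.map_congr_left
  intro x hx
  rcases Nat.lt_or_ge (x*h+y) flat.length with hl | hg
  · rw [List.getD_append _ _ _ _ hl]
  · rw [List.getD_eq_default _ _ hg]
    rcases Nat.lt_or_ge (x*h+y) (flat.length + k) with h2 | h2
    · rw [List.getD_eq_getElem?_getD]
      rw [List.getElem?_append_right hg]
      simp [List.getElem?_replicate, (by omega : x*h+y-flat.length < k)]
    · rw [List.getD_eq_default _ _ (by simp; omega)]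

theorem pvLen_lt {h x y : Nat} (hy : y < h) (hx : x < 8) : x * h + y < 8 * h := by
  have h2 : (x+1) * h ≤ 8 * h := Nat.mul_le_mul_right _ (by omega)
  have h3 : (x+1) * h = x * h + h := by ring
  omega

theorem pvChunk_step (flat : List Int) (n R : Nat) (hR : 0 < R) (v : Int) :
    flat ++ List.replicate (min (n+1) R) v = (flat ++ [v]) ++ List.replicate (min n (R-1)) v := by
  have hk : min (n+1) R = (min n (R-1)) + 1 := by omega
  rw [hk, List.replicate_succ, List.append_assoc]
  rfl

theorem pvDChunk_step (flat : List Int) (c : Int) (z n R : Nat) (hR : 0 < R) :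
    flat ++ (List.range (min (n+1) R)).map (fun j => pvDVal c (z + j))
      = (flat ++ [pvDVal c z]) ++ (List.range (min n (R-1))).map (fun j => pvDVal c (z + 1 + j)) := by
  have hk : min (n+1) R = (min n (R-1)) + 1 := by omega
  have hmap : (List.range (min n (R-1))).map ((fun j => pvDVal c (z + j)) ∘ Nat.succ)
      = (List.range (min n (R-1))).map (fun j => pvDVal c (z + 1 + j)) := by
    apply List.map_congr_left
    intro j hj
    show pvDVal c (z + (j+1)) = _
    rw [show z + (j+1) = z + 1 + j from by omega]
  rw [hk, List.range_succ_eq_map, List.map_cons, List.map_map, hmap, List.append_assoc, Nat.add_zero]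
  rfl

theorem pvInv_bound {h x y : Nat} {flat : List Int} (h0 : 0 < h)
    (hi : pvInv h x y flat) : x < 8 ↔ flat.length < 8 * h := by
  obtain ⟨hyh, hx8, hxy, hlen⟩ := hi
  constructor
  · intro hx; rw [hlen]; exact pvLen_lt hyh hx
  · intro hf
    by_contra hx
    have hx8' : x = 8 := by omega
    have hy0 : y = 0 := hxy hx8'
    rw [hlen, hx8', hy0] at hf
    omega

theorem pvClamp_eq (r : Int) (rem : Nat) : pvClamp r rem = min r.toNat rem := by
  unfold pvClamp
  omega

theorem pvDitherChunk_eq (c r : Int) (rem : Nat) :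
    pvDitherChunk c (pvClamp r rem) = (List.range (min r.toNat rem)).map (fun j => pvDVal c (0 + j)) := by
  unfold pvDitherChunk
  rw [pvClamp_eq]
  apply List.map_congr_left
  intro j hj
  rw [Nat.zero_add, pvDVal]

theorem pvRunSingle_eq {h : Nat} {height : Int} (hh : height = (h : Nat)) (h0 : 0 < h)
    (v : Int) (fuel : Nat) :
    ∀ (x y : Nat) (flat : List Int), pvInv h x y flat →
    ∃ x' y', pvARunSingle height v fuel x y (pvGrid h flat)
        = (pvGrid h (flat ++ List.replicate (min fuel (8 * h - flat.length)) v), x', y')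
      ∧ pvInv h x' y' (flat ++ List.replicate (min fuel (8 * h - flat.length)) v) := by
  induction fuel with
  | zero =>
    intro x y flat hi
    exact ⟨x, y, by simp [pvARunSingle], by simpa using hi⟩
  | succ n ih =>
    intro x y flat hi
    obtain ⟨hyh, hx8, hxy, hlen⟩ := hi
    by_cases hx : 8 ≤ x
    · have hx8' : x = 8 := by omega
      have hy0 : y = 0 := hxy hx8'
      have hz : 8 * h - flat.length = 0 := by subst hx8' hy0; omega
      refine ⟨x, y, ?_, ?_⟩
      · simp [pvARunSingle, hx, hz]
      · simpa [hz] using ⟨hyh, hx8, hxy, hlen⟩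
    · push_neg at hx
      have hlt : flat.length < 8 * h := by rw [hlen]; exact pvLen_lt hyh hx
      have hguard : ((y : Nat) : Int) < height := by rw [hh]; exact_mod_cast hyh
      have hwrite := pvGrid_write flat v hyh hx hlen
      have hchunk := pvChunk_step flat n (8 * h - flat.length) (by omega) v
      have hlen1 : (flat ++ [v]).length = flat.length + 1 := by simp
      by_cases hwrap : h ≤ y + 1
      · have hyeq : y + 1 = h := by omega
        have hinv : pvInv h (x+1) 0 (flat ++ [v]) := by
          refine ⟨h0, by omega, by intro h8; rfl, ?_⟩
          rw [hlen1, hlen]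
          have : (x+1) * h = x * h + h := by ring
          omega
        obtain ⟨x', y', heq, hinv'⟩ := ih (x+1) 0 (flat ++ [v]) hinv
        rw [hlen1] at heq hinv'
        have hsub : 8 * h - (flat.length + 1) = 8 * h - flat.length - 1 := by omega
        rw [hsub] at heq hinv'
        refine ⟨x', y', ?_, ?_⟩
        · show pvARunSingle height v (n+1) x y (pvGrid h flat) = _
          rw [pvARunSingle]
          rw [if_neg (by omega), if_pos hguard, if_pos (by rw [hh]; exact_mod_cast hwrap)]
          rw [hwrite, heq, hchunk]
        · rw [hchunk]; exact hinv'
      · have hinv : pvInv h x (y+1) (flat ++ [v]) := by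
          refine ⟨by omega, hx8, by omega, by rw [hlen1, hlen]; omega⟩
        obtain ⟨x', y', heq, hinv'⟩ := ih x (y+1) (flat ++ [v]) hinv
        rw [hlen1] at heq hinv'
        have hsub : 8 * h - (flat.length + 1) = 8 * h - flat.length - 1 := by omega
        rw [hsub] at heq hinv'
        refine ⟨x', y', ?_, ?_⟩
        · show pvARunSingle height v (n+1) x y (pvGrid h flat) = _
          rw [pvARunSingle]
          rw [if_neg (by omega), if_pos hguard, if_neg (by rw [hh]; push_cast; omega)]
          rw [hwrite, heq, hchunk]
        · rw [hchunk]; exact hinv'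

theorem pvRunDither_eq {h : Nat} {height : Int} (hh : height = (h : Nat)) (h0 : 0 < h)
    (c : Int) (fuel : Nat) :
    ∀ (z x y : Nat) (flat : List Int), pvInv h x y flat →
    ∃ x' y', pvARunDither height c fuel z x y (pvGrid h flat)
        = (pvGrid h (flat ++ (List.range (min fuel (8 * h - flat.length))).map (fun j => pvDVal c (z + j))), x', y')
      ∧ pvInv h x' y' (flat ++ (List.range (min fuel (8 * h - flat.length))).map (fun j => pvDVal c (z + j))) := by
  induction fuel with
  | zero =>
    intro z x y flat hi
    exact ⟨x, y, by simp [pvARunDither], by simpa using hi⟩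
  | succ n ih =>
    intro z x y flat hi
    obtain ⟨hyh, hx8, hxy, hlen⟩ := hi
    by_cases hx : 8 ≤ x
    · have hx8' : x = 8 := by omega
      have hy0 : y = 0 := hxy hx8'
      have hz : 8 * h - flat.length = 0 := by subst hx8' hy0; omega
      refine ⟨x, y, ?_, ?_⟩
      · simp [pvARunDither, hx, hz]
      · simpa [hz] using ⟨hyh, hx8, hxy, hlen⟩
    · push_neg at hx
      have hlt : flat.length < 8 * h := by rw [hlen]; exact pvLen_lt hyh hx
      have hguard : ((y : Nat) : Int) < height := by rw [hh]; exact_mod_cast hyh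
      have hwrite := pvGrid_write flat (pvDVal c z) hyh hx hlen
      have hchunk := pvDChunk_step flat c z n (8 * h - flat.length) (by omega)
      have hlen1 : (flat ++ [pvDVal c z]).length = flat.length + 1 := by simp
      by_cases hwrap : h ≤ y + 1
      · have hinv : pvInv h (x+1) 0 (flat ++ [pvDVal c z]) := by
          refine ⟨h0, by omega, by intro h8; rfl, ?_⟩
          rw [hlen1, hlen]
          have : (x+1) * h = x * h + h := by ring
          omega
        obtain ⟨x', y', heq, hinv'⟩ := ih (z+1) (x+1) 0 (flat ++ [pvDVal c z]) hinv
        rw [hlen1] at heq hinv'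
        have hsub : 8 * h - (flat.length + 1) = 8 * h - flat.length - 1 := by omega
        rw [hsub] at heq hinv'
        refine ⟨x', y', ?_, ?_⟩
        · show pvARunDither height c (n+1) z x y (pvGrid h flat) = _
          rw [pvARunDither]
          rw [if_neg (by omega), if_pos hguard, if_pos (by rw [hh]; exact_mod_cast hwrap)]
          rw [hwrite, heq, hchunk]
        · rw [hchunk]; exact hinv'
      · have hinv : pvInv h x (y+1) (flat ++ [pvDVal c z]) := by
          refine ⟨by omega, hx8, by omega, by rw [hlen1, hlen]; omega⟩
        obtain ⟨x', y', heq, hinv'⟩ := ih (z+1) x (y+1) (flat ++ [pvDVal c z]) hinv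
        rw [hlen1] at heq hinv'
        have hsub : 8 * h - (flat.length + 1) = 8 * h - flat.length - 1 := by omega
        rw [hsub] at heq hinv'
        refine ⟨x', y', ?_, ?_⟩
        · show pvARunDither height c (n+1) z x y (pvGrid h flat) = _
          rw [pvARunDither]
          rw [if_neg (by omega), if_pos hguard, if_neg (by rw [hh]; push_cast; omega)]
          rw [hwrite, heq, hchunk]
        · rw [hchunk]; exact hinv'

theorem pvRunRepeat_eq {h : Nat} {height : Int} (hh : height = (h : Nat)) (h0 : 0 < h)
    (fuel : Nat) :
    ∀ (x y : Nat) (flat : List Int), pvInv h x y flat →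
    ∃ x' y', pvARunRepeat height fuel x y (pvGrid h flat)
        = (pvGrid h (pvBRepeat h (8 * h) fuel flat), x', y')
      ∧ pvInv h x' y' (pvBRepeat h (8 * h) fuel flat) := by
  induction fuel with
  | zero =>
    intro x y flat hi
    exact ⟨x, y, by simp [pvARunRepeat, pvBRepeat], by simpa [pvBRepeat] using hi⟩
  | succ n ih =>
    intro x y flat hi
    obtain ⟨hyh, hx8, hxy, hlen⟩ := hi
    by_cases hx : 8 ≤ x
    · have hx8' : x = 8 := by omega
      have hy0 : y = 0 := hxy hx8'
      have hnlt : ¬ flat.length < 8 * h := by subst hx8' hy0; omega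
      refine ⟨x, y, ?_, ?_⟩
      · rw [pvBRepeat, if_neg hnlt]
        simp [pvARunRepeat, hx]
      · rw [pvBRepeat, if_neg hnlt]
        exact ⟨hyh, hx8, hxy, hlen⟩
    · push_neg at hx
      have hlt : flat.length < 8 * h := by rw [hlen]; exact pvLen_lt hyh hx
      have hguard : ((y : Nat) : Int) < height := by rw [hh]; exact_mod_cast hyh
      -- A's read value equals B's appended value
      have hval : (if 0 < x then ((pvGrid h flat).getD y []).getD (x-1) 0 else 0)
          = (if h ≤ flat.length then flat.getD (flat.length - h) 0 else 0) := by
        by_cases hx0 : 0 < x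
        · have hge : h ≤ flat.length := by
            rw [hlen]
            calc h = 1 * h := (one_mul h).symm
            _ ≤ x * h := Nat.mul_le_mul_right _ hx0
            _ ≤ x * h + y := Nat.le_add_right _ _
          rw [if_pos hx0, if_pos hge, pvGrid_read flat hyh (by omega)]
          congr 1
          rw [hlen]
          have hxm : x * h = (x-1) * h + h := by
            have : x - 1 + 1 = x := by omega
            calc x * h = (x - 1 + 1) * h := by rw [this]
            _ = (x-1) * h + h := by ring
          omega
        · have : x = 0 := by omega
          subst this
          rw [if_neg (by omega), if_neg (by rw [hlen]; omega)]
      have hwrite := pvGrid_write flat (if h ≤ flat.length then flat.getD (flat.length - h) 0 else 0) hyh hx hlen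
      set w := (if h ≤ flat.length then flat.getD (flat.length - h) 0 else 0) with hw
      have hlen1 : (flat ++ [w]).length = flat.length + 1 := by simp
      have hB : pvBRepeat h (8*h) (n+1) flat = pvBRepeat h (8*h) n (flat ++ [w]) := by
        rw [pvBRepeat, if_pos hlt]
      by_cases hwrap : h ≤ y + 1
      · have hinv : pvInv h (x+1) 0 (flat ++ [w]) := by
          refine ⟨h0, by omega, by intro h8; rfl, ?_⟩
          rw [hlen1, hlen]
          have : (x+1) * h = x * h + h := by ring
          omega
        obtain ⟨x', y', heq, hinv'⟩ := ih (x+1) 0 (flat ++ [w]) hinv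
        refine ⟨x', y', ?_, ?_⟩
        · show pvARunRepeat height (n+1) x y (pvGrid h flat) = _
          rw [pvARunRepeat]
          rw [if_neg (by omega), hval]
          try dsimp only
          rw [if_pos hguard, if_pos (by rw [hh]; exact_mod_cast hwrap)]
          rw [hwrite, heq, hB]
        · rw [hB]; exact hinv'
      · have hinv : pvInv h x (y+1) (flat ++ [w]) := by
          refine ⟨by omega, hx8, by omega, by rw [hlen1, hlen]; omega⟩
        obtain ⟨x', y', heq, hinv'⟩ := ih x (y+1) (flat ++ [w]) hinv
        refine ⟨x', y', ?_, ?_⟩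
        · show pvARunRepeat height (n+1) x y (pvGrid h flat) = _
          rw [pvARunRepeat]
          rw [if_neg (by omega), hval]
          try dsimp only
          rw [if_pos hguard, if_neg (by rw [hh]; push_cast; omega)]
          rw [hwrite, heq, hB]
        · rw [hB]; exact hinv'

theorem pvLoop_eq {h : Nat} {height : Int} (hh : height = (h : Nat)) (h0 : 0 < h) :
    ∀ (src : List Int) (x y : Nat) (flat : List Int), pvInv h x y flat →
    pvALoop height src x y (pvGrid h flat) = pvGrid h (pvBLoop h (8 * h) src flat) := by
  suffices H : ∀ (n : Nat) (src : List Int), src.length ≤ n →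
      ∀ (x y : Nat) (flat : List Int), pvInv h x y flat →
      pvALoop height src x y (pvGrid h flat) = pvGrid h (pvBLoop h (8 * h) src flat) by
    intro src; exact H src.length src le_rfl
  intro n
  induction n with
  | zero =>
    intro src hsl x y flat hinv
    have hnil : src = [] := by
      cases src with
      | nil => rfl
      | cons a l => simp at hsl
    subst hnil
    rw [pvALoop.eq_def, pvBLoop.eq_def]; dsimp only
    split_ifs <;> rfl
  | succ n ih =>
    intro src hsl x y flat hinv
    cases src with
    | nil =>
      rw [pvALoop.eq_def, pvBLoop.eq_def]; dsimp only
      split_ifs <;> rfl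
    | cons color rest =>
      rw [pvALoop.eq_def, pvBLoop.eq_def]; dsimp only
      by_cases hx : x < 8
      · have hflt : flat.length < 8 * h := (pvInv_bound h0 hinv).1 hx
        rw [if_pos hx, if_pos hflt]
        try dsimp only
        by_cases hc1 : Int.land color 128 ≠ 0
        · rw [if_pos hc1, if_pos hc1]
          by_cases hc2 : Int.land color 64 ≠ 0
          · rw [if_pos hc2, if_pos hc2]
            cases rest with
            | nil => rfl
            | cons c2 rest2 =>
              try dsimp only
              by_cases hr0 : Int.land color 63 = 0
              · rw [if_pos hr0, if_pos hr0]
                cases rest2 with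
                | nil => rfl
                | cons r rest3 =>
                  try dsimp only
                  obtain ⟨x', y', heq, hinv'⟩ := pvRunDither_eq hh h0 c2 r.toNat 0 x y flat hinv
                  rw [heq]
                  try dsimp only
                  rw [pvDitherChunk_eq]
                  exact ih rest3 (by simp at hsl; omega) x' y' _ hinv'
              · rw [if_neg hr0, if_neg hr0]
                obtain ⟨x', y', heq, hinv'⟩ := pvRunDither_eq hh h0 c2 (Int.land color 63).toNat 0 x y flat hinv
                rw [heq]
                try dsimp only
                rw [pvDitherChunk_eq]
                exact ih rest2 (by simp at hsl; omega) x' y' _ hinv'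
          · rw [if_neg hc2, if_neg hc2]
            by_cases hr0 : Int.land color 63 = 0
            · rw [if_pos hr0, if_pos hr0]
              cases rest with
              | nil => rfl
              | cons r rest2 =>
                try dsimp only
                obtain ⟨x', y', heq, hinv'⟩ := pvRunRepeat_eq hh h0 r.toNat x y flat hinv
                rw [heq]
                try dsimp only
                exact ih rest2 (by simp at hsl; omega) x' y' _ hinv'
            · rw [if_neg hr0, if_neg hr0]
              obtain ⟨x', y', heq, hinv'⟩ := pvRunRepeat_eq hh h0 (Int.land color 63).toNat x y flat hinv
              rw [heq]
              try dsimp only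
              exact ih rest (by simp at hsl; omega) x' y' _ hinv'
        · rw [if_neg hc1, if_neg hc1]
          by_cases hr0 : color >>> (4:Int) = 0
          · rw [if_pos hr0, if_pos hr0]
            cases rest with
            | nil => rfl
            | cons r rest2 =>
              try dsimp only
              obtain ⟨x', y', heq, hinv'⟩ := pvRunSingle_eq hh h0 (Int.land color 15) r.toNat x y flat hinv
              rw [heq]
              try dsimp only
              rw [pvClamp_eq]
              exact ih rest2 (by simp at hsl; omega) x' y' _ hinv'
          · rw [if_neg hr0, if_neg hr0]
            obtain ⟨x', y', heq, hinv'⟩ := pvRunSingle_eq hh h0 (Int.land color 15) (color >>> (4:Int)).toNat x y flat hinv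
            rw [heq]
            try dsimp only
            rw [pvClamp_eq]
            exact ih rest (by simp at hsl; omega) x' y' _ hinv'
      · have hnf : ¬ flat.length < 8 * h := by
          rw [← pvInv_bound h0 hinv]; exact hx
        rw [if_neg hx, if_neg hnf]

theorem pvARunSingle_deg {height : Int} (hne : height ≤ 0) (v : Int) (fuel : Nat) :
    ∀ (x y : Nat) (p : List (List Int)), (pvARunSingle height v fuel x y p).1 = p := by
  induction fuel with
  | zero => intro x y p; rfl
  | succ n ih =>
    intro x y p
    rw [pvARunSingle]
    by_cases h1 : 8 ≤ x
    · rw [if_pos h1]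
    · rw [if_neg h1]
      try dsimp only
      rw [if_neg (show ¬((y : Nat) : Int) < height from by omega)]
      try dsimp only
      split_ifs with h2 <;> exact ih _ _ _

theorem pvARunDither_deg {height : Int} (hne : height ≤ 0) (c : Int) (fuel : Nat) :
    ∀ (z x y : Nat) (p : List (List Int)), (pvARunDither height c fuel z x y p).1 = p := by
  induction fuel with
  | zero => intro z x y p; rfl
  | succ n ih =>
    intro z x y p
    rw [pvARunDither]
    by_cases h1 : 8 ≤ x
    · rw [if_pos h1]
    · rw [if_neg h1]
      try dsimp only
      rw [if_neg (show ¬((y : Nat) : Int) < height from by omega)]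
      try dsimp only
      split_ifs with h2 <;> exact ih _ _ _ _

theorem pvARunRepeat_deg {height : Int} (hne : height ≤ 0) (fuel : Nat) :
    ∀ (x y : Nat) (p : List (List Int)), (pvARunRepeat height fuel x y p).1 = p := by
  induction fuel with
  | zero => intro x y p; rfl
  | succ n ih =>
    intro x y p
    rw [pvARunRepeat]
    by_cases h1 : 8 ≤ x
    · rw [if_pos h1]
    · rw [if_neg h1]
      try dsimp only
      rw [if_neg (show ¬((y : Nat) : Int) < height from by omega)]
      try dsimp only
      split_ifs with h2 <;> exact ih _ _ _

theorem pvALoop_deg {height : Int} (hne : height ≤ 0) :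
    ∀ (src : List Int) (x y : Nat) (p : List (List Int)), pvALoop height src x y p = p := by
  suffices H : ∀ (n : Nat) (src : List Int), src.length ≤ n →
      ∀ (x y : Nat) (p : List (List Int)), pvALoop height src x y p = p by
    intro src; exact H src.length src le_rfl
  intro n
  induction n with
  | zero =>
    intro src hsl x y p
    have hnil : src = [] := by cases src with
      | nil => rfl
      | cons a l => simp at hsl
    subst hnil
    rw [pvALoop.eq_def]; dsimp only
    split_ifs <;> rfl
  | succ n ih =>
    intro src hsl x y p
    cases src with
    | nil =>
      rw [pvALoop.eq_def]; dsimp only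
      split_ifs <;> rfl
    | cons color rest =>
      rw [pvALoop.eq_def]; dsimp only
      by_cases hx : x < 8
      · rw [if_pos hx]
        by_cases hc1 : Int.land color 128 ≠ 0
        · rw [if_pos hc1]
          by_cases hc2 : Int.land color 64 ≠ 0
          · rw [if_pos hc2]
            cases rest with
            | nil => rfl
            | cons c2 rest2 =>
              try dsimp only
              by_cases hr0 : Int.land color 63 = 0
              · rw [if_pos hr0]
                cases rest2 with
                | nil => rfl
                | cons r rest3 =>
                  try dsimp only
                  rw [ih rest3 (by simp at hsl; omega), pvARunDither_deg hne]
              · rw [if_neg hr0, ih rest2 (by simp at hsl; omega), pvARunDither_deg hne]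
          · rw [if_neg hc2]
            by_cases hr0 : Int.land color 63 = 0
            · rw [if_pos hr0]
              cases rest with
              | nil => rfl
              | cons r rest2 =>
                try dsimp only
                rw [ih rest2 (by simp at hsl; omega), pvARunRepeat_deg hne]
            · rw [if_neg hr0, ih rest (by simp at hsl; omega), pvARunRepeat_deg hne]
        · rw [if_neg hc1]
          by_cases hr0 : color >>> (4:Int) = 0
          · rw [if_pos hr0]
            cases rest with
            | nil => rfl
            | cons r rest2 =>
              try dsimp only
              rw [ih rest2 (by simp at hsl; omega), pvARunSingle_deg hne]
          · rw [if_neg hr0, ih rest (by simp at hsl; omega), pvARunSingle_deg hne]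
      · rw [if_neg hx]

theorem pvMain (src : List Int) (height : Int) :
    drawStripEGA src height = drawStripEGA_alt src height := by
  by_cases hpos : 0 < height
  · have hh : height = ((height.toNat : Nat) : Int) := by omega
    have h0 : 0 < height.toNat := by omega
    have hinv0 : pvInv height.toNat 0 0 [] := ⟨h0, by omega, by omega, by simp⟩
    have hA : drawStripEGA src height
        = pvGrid height.toNat (pvBLoop height.toNat (8 * height.toNat) src []) := by
      rw [drawStripEGA, ← pvGrid_nil]
      exact pvLoop_eq hh h0 src 0 0 [] hinv0
    rw [hA]
    show _ = pvGrid height.toNat (pvBLoop height.toNat (8 * height.toNat) src [] ++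
      List.replicate (8 * height.toNat - (pvBLoop height.toNat (8 * height.toNat) src []).length) 0)
    rw [pvGrid_pad]
  · have hz : height.toNat = 0 := by omega
    rw [drawStripEGA, hz]
    rw [pvALoop_deg (by omega)]
    show List.replicate 0 (List.replicate 8 0) = drawStripEGA_alt src height
    rw [drawStripEGA_alt, hz]
    rfl

-- ===== VERDICT (by name: the statement is the Claim_ definition above) =====
theorem drawStripEGA_spec : Claim_equal_drawStripEGA := by
  intro src height _
  exact pvMain src height
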